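-- pv_equiv track=rewrite | github.com/yamaton/CodeForces | problemSet/230A-Dragons.py | solve
-- ===== SOURCE A (Python) =====
-- def solve(strength, xs):
--     for (dragon_strength, bonus) in sorted(xs):
--         if strength > dragon_strength:
--             strength += bonus
--         else:
--             return False
--     else:
--         return True
-- ===== SOURCE B (Python) =====
-- def solve(strength, xs):
--     # Selection strategy: no sorting; repeatedly fight the weakest remaining
--     # dragon (lexicographic min, as A's sorted order would schedule it).
--     remaining = list(xs)
--     while remaining:
--         weakest = min(remaining)
--         if strength <= weakest[0]:
--             return False
--         strength += weakest[1]
--         remaining.remove(weakest)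
--     return True
-- ===== Notes on version B (the rewrite author's own statement) =====
-- stated objective: alternative
-- what changed: Replaces sort-then-scan with a selection loop that never sorts: it repeatedly extracts the lexicographically weakest remaining dragon with min() and remove(), fighting dragons one extraction at a time.
import Mathlib
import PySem

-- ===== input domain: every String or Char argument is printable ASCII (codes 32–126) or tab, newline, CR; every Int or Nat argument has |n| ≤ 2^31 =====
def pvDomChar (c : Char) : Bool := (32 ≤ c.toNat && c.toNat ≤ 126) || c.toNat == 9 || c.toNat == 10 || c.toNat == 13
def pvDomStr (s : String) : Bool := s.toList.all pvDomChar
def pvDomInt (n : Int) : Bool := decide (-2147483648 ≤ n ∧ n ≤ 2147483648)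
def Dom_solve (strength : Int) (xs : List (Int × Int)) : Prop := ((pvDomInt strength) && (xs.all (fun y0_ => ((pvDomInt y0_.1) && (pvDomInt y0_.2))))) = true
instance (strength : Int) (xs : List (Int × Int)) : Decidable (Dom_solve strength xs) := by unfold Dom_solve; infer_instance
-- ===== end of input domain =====

-- B replaces A's sort-then-scan with a selection loop (repeatedly extract the weakest
-- remaining dragon with min/remove, no sorting): same result, different algorithm.

-- ===== PORT A =====
def solveLoop (strength : Int) : List (Int × Int) → Bool
  | [] => true
  | (ds, b) :: rest => if strength > ds then solveLoop (strength + b) rest else false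

def solve (strength : Int) (xs : List (Int × Int)) : Bool :=
  solveLoop strength (PySem.List.sorted2 xs (fun p => p.1) (fun p => p.2))

-- ===== PORT B =====
-- min(remaining) on pairs is the lexicographic minimum: PySem.List.min2?.
-- It agrees with min? under the injective key toLex (proved here because the
-- port's termination argument cites it).
theorem min2?_eq_min?_toLex (xs : List (Int × Int)) :
    PySem.List.min2? xs (fun p => p.1) (fun p => p.2)
      = PySem.List.min? xs (fun p => toLex p) := by
  unfold PySem.List.min2? PySem.List.min?
  congr 1
  funext acc x
  cases acc with
  | none => rfl
  | some m =>
      by_cases hc : toLex x < toLex m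
      · have hc' := hc
        rw [Prod.Lex.lt_iff] at hc'
        simp only [ofLex_toLex] at hc'
        simp only [hc, if_true]
        have hb : (decide (x.1 < m.1) || (!decide (m.1 < x.1) && decide (x.2 < m.2))) = true := by
          simp; omega
        simp [hb]
      · have hc' := hc
        rw [Prod.Lex.lt_iff] at hc'
        simp only [ofLex_toLex] at hc'
        have hb : (decide (x.1 < m.1) || (!decide (m.1 < x.1) && decide (x.2 < m.2))) = false := by
          simp
          omega
        simp [hb, hc]

-- remaining.remove(weakest): the minimum is a member, so Python's list.remove is
-- exactly List.erase here (PySem.List.remove?_eq_some_erase).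
def solve_alt (strength : Int) (xs : List (Int × Int)) : Bool :=
  match h : PySem.List.min2? xs (fun p => p.1) (fun p => p.2) with
  | none => true
  | some weakest =>
      if strength ≤ weakest.1 then false
      else solve_alt (strength + weakest.2) (xs.erase weakest)
termination_by xs.length
decreasing_by
  have hm : weakest ∈ xs := by
    rw [min2?_eq_min?_toLex] at h
    exact PySem.List.min?_mem h
  have := List.length_erase_of_mem hm
  have : 0 < xs.length := List.length_pos_of_mem hm
  omega

-- ===== PRECONDITION & SPEC =====
def Spec_solve (strength : Int) (xs : List (Int × Int)) (out : Bool) : Prop := out = solve_alt strength xs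
instance (strength : Int) (xs : List (Int × Int)) (out : Bool) : Decidable (Spec_solve strength xs out) := by unfold Spec_solve; infer_instance

-- ===== CLAIM (what is proved, stated in full; the proofs are below) =====
def Claim_equal_solve : Prop := ∀ (strength : Int) (xs : List (Int × Int)), Dom_solve strength xs → Spec_solve strength xs (solve strength xs)

-- ===== LEMMAS AND PROOFS =====

-- A's sorted2 (tuple key) is sorted under the injective key toLex.
theorem sorted2_eq_sorted_toLex (xs : List (Int × Int)) :
    PySem.List.sorted2 xs (fun p => p.1) (fun p => p.2)
      = PySem.List.sorted xs (fun p => toLex p) := by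
  have hbf : (fun (a b : Int × Int) => (decide (a.1 < b.1) || (!decide (b.1 < a.1) && decide (a.2 < b.2))))
      = (fun (a b : Int × Int) => decide (toLex a < toLex b)) := by
    funext a b
    simp only [← decide_not, ← Bool.decide_and, ← Bool.decide_or]
    apply decide_eq_decide.mpr
    rw [Prod.Lex.lt_iff]
    simp only [ofLex_toLex]
    constructor <;> intro h <;> omega
  rw [PySem.List.sorted_eq_foldl_insertBy]
  unfold PySem.List.sorted2
  simp only
  congr 1
  funext acc x
  simp [hbf]

-- sorted xs = weakest :: sorted (xs.erase weakest)
theorem sorted_cons_min (xs : List (Int × Int)) (m : Int × Int)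
    (h : PySem.List.min? xs (fun p => toLex p) = some m) :
    PySem.List.sorted xs (fun p => toLex p)
      = m :: PySem.List.sorted (xs.erase m) (fun p => toLex p) := by
  have hm : m ∈ xs := PySem.List.min?_mem h
  apply PySem.List.eq_of_perm_of_pairwise_le_of_injective (fun p => toLex p) toLex.injective
  · exact (PySem.List.sorted_perm xs _ false).trans
      ((List.perm_cons_erase hm).trans
        ((PySem.List.sorted_perm (xs.erase m) (fun p => toLex p) false).cons m).symm)
  · exact PySem.List.sorted_pairwise xs (fun p => toLex p)
  · refine List.Pairwise.cons ?_ (PySem.List.sorted_pairwise (xs.erase m) (fun p => toLex p))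
    intro y hy
    exact PySem.List.min?_isMin h y
      (List.mem_of_mem_erase ((PySem.List.mem_sorted _ _ _ _).mp hy))

theorem loop_eq_sel (n : Nat) : ∀ (xs : List (Int × Int)), xs.length ≤ n → ∀ (s : Int),
    solveLoop s (PySem.List.sorted xs (fun p => toLex p)) = solve_alt s xs := by
  induction n with
  | zero =>
      intro xs hlen s
      have hxs : xs = [] := List.eq_nil_of_length_eq_zero (Nat.le_zero.mp hlen)
      subst hxs
      rw [solve_alt]
      rfl
  | succ n ih =>
      intro xs hlen s
      rw [solve_alt]
      rw [min2?_eq_min?_toLex]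
      cases hmin : PySem.List.min? xs (fun p => toLex p) with
      | none =>
          have hxs := (PySem.List.min?_eq_none_iff xs _).mp hmin
          subst hxs
          rfl
      | some m =>
          have hm : m ∈ xs := PySem.List.min?_mem hmin
          rw [sorted_cons_min xs m hmin]
          obtain ⟨ds, b⟩ := m
          simp only [solveLoop]
          have hlen' : (xs.erase (ds, b)).length ≤ n := by
            have := List.length_erase_of_mem hm
            have := List.length_pos_of_mem hm
            omega
          by_cases hc : s > ds
          · rw [if_pos hc, if_neg (by omega : ¬ s ≤ ds)]
            exact ih (xs.erase (ds, b)) hlen' (s + b)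
          · rw [if_neg hc, if_pos (by omega : s ≤ ds)]

-- ===== VERDICT (by name: the statement is the Claim_ definition above) =====
theorem solve_spec : Claim_equal_solve := by
  intro strength xs _
  unfold Spec_solve solve
  rw [sorted2_eq_sorted_toLex]
  exact loop_eq_sel xs.length xs le_rfl strength
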